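-- pv_equiv track=rewrite | github.com/karansinghneu/CS-6200-IR | IR-Final-Project/Phase2/SnippetGeneration.py | remove_redundant_corpus
-- ===== SOURCE A (Python) =====
-- def remove_redundant_corpus(cleaned_data):
--     # Removing redundant spaces.
--     cleaned_data = ' '.join(cleaned_data.split())
--     clean = []
--     lis = cleaned_data.split()
--     check = False
--     for i in range(len(lis) - 1, -1, -1):
--         if 'AM' in lis[i] or 'PM' in lis[i] or 'am' in lis[i] or 'pm' in lis[i] or check == True:
--             clean.append(lis[i])
--             check = True
--         else:
--             continue
--     clean.reverse()
--     strr = ' '.join(clean)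
--     return strr
-- ===== SOURCE B (Python) =====
-- def _has_time(tok):
--     return 'AM' in tok or 'PM' in tok or 'am' in tok or 'pm' in tok
--
--
-- def remove_redundant_corpus(cleaned_data):
--     lis = cleaned_data.split()
--     matches = [i for i, tok in enumerate(lis) if _has_time(tok)]
--     last = max(matches, default=-1)
--     return ' '.join(lis[:last + 1])
-- ===== Notes on version B (the rewrite author's own statement) =====
-- stated objective: simpler
-- what changed: Replaces the backward scan with a sticky flag by a forward pass that collects the matching indices, takes the maximum (default -1), and joins the prefix slice lis[:last+1]; the redundant join-then-resplit normalization is dropped.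
import Mathlib
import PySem

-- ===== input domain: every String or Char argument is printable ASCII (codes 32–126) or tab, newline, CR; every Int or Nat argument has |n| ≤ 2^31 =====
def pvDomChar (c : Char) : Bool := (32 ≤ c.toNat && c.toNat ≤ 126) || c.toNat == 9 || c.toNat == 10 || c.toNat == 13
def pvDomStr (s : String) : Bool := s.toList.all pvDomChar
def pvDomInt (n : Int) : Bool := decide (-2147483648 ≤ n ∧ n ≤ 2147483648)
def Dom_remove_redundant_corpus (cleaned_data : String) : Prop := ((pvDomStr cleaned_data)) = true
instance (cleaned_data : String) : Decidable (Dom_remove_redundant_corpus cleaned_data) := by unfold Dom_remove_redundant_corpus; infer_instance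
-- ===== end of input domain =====

-- B replaces A's backward scan with a sticky flag by a forward pass: collect matching
-- indices, take the maximum (default -1), join the prefix slice (objective: simpler).

-- ===== PORT A =====
def remove_redundant_corpus (cleaned_data : String) : String :=
  let cleaned_data' := PySem.Str.join " " (PySem.Str.split₀ cleaned_data)
  let lis := PySem.Str.split₀ cleaned_data'
  let st := (PySem.List.pyRange ((lis.length : Int) - 1) (-1) (-1)).foldl
    (fun (st : List String × Bool) i =>
      if PySem.Str.isIn "AM" (PySem.List.pyGetD lis i "") ||
         PySem.Str.isIn "PM" (PySem.List.pyGetD lis i "") ||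
         PySem.Str.isIn "am" (PySem.List.pyGetD lis i "") ||
         PySem.Str.isIn "pm" (PySem.List.pyGetD lis i "") || st.2 then
        (st.1 ++ [PySem.List.pyGetD lis i ""], true)
      else st)
    ([], false)
  PySem.Str.join " " st.1.reverse

-- ===== PORT B =====
def pvHasTime (tok : String) : Bool :=
  PySem.Str.isIn "AM" tok || PySem.Str.isIn "PM" tok ||
  PySem.Str.isIn "am" tok || PySem.Str.isIn "pm" tok

def remove_redundant_corpus_alt (cleaned_data : String) : String :=
  let lis := PySem.Str.split₀ cleaned_data
  let matched := ((PySem.List.enumerate lis).filter (fun q => pvHasTime q.2)).map (fun q => q.1)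
  let last := (PySem.List.max? matched (fun x => x)).getD (-1)
  PySem.Str.join " " (PySem.List.slice lis none (some (last + 1)))

-- ===== PRECONDITION & SPEC =====
def Spec_remove_redundant_corpus (cleaned_data : String) (out : String) : Prop := out = remove_redundant_corpus_alt cleaned_data
instance (cleaned_data : String) (out : String) : Decidable (Spec_remove_redundant_corpus cleaned_data out) := by unfold Spec_remove_redundant_corpus; infer_instance

-- ===== CLAIM (what is proved, stated in full; the proofs are below) =====
def Claim_equal_remove_redundant_corpus : Prop := ∀ (cleaned_data : String), Dom_remove_redundant_corpus cleaned_data → Spec_remove_redundant_corpus cleaned_data (remove_redundant_corpus cleaned_data)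

-- ===== LEMMAS AND PROOFS =====

-- a "good" token: nonempty and whitespace-free
def pvGood (t : List Char) : Prop := t ≠ [] ∧ ∀ c ∈ t, PySem.Chars.isspace c = false

-- split₀.go consumes a whitespace-free chunk by pushing it (reversed) onto cur
theorem pv_go_word (w : List Char) (hw : ∀ c ∈ w, PySem.Chars.isspace c = false) :
    ∀ (rest cur : List Char) (acc : List (List Char)),
    PySem.Chars.split₀.go (w ++ rest) cur acc = PySem.Chars.split₀.go rest (w.reverse ++ cur) acc := by
  induction w with
  | nil => intro rest cur acc; simp
  | cons c w ih =>
      intro rest cur acc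
      have hc : PySem.Chars.isspace c = false := hw c (by simp)
      have hw' : ∀ c ∈ w, PySem.Chars.isspace c = false := fun x hx => hw x (by simp [hx])
      simp [PySem.Chars.split₀.go, hc, ih hw' rest (c :: cur) acc]

-- every token produced by split₀ is good
theorem pv_tokens_good : ∀ (s cur : List Char) (acc : List (List Char)),
    (∀ c ∈ cur, PySem.Chars.isspace c = false) → (∀ t ∈ acc, pvGood t) →
    ∀ t ∈ PySem.Chars.split₀.go s cur acc, pvGood t := by
  intro s
  induction s with
  | nil =>
      intro cur acc hcur hacc t ht
      by_cases h : cur.isEmpty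
      · simp [PySem.Chars.split₀.go, h] at ht
        exact hacc t (List.mem_reverse.mp (by simpa using ht))
      · simp [PySem.Chars.split₀.go, h] at ht
        rcases ht with h2 | h1
        · exact hacc t h2
        · subst h1
          refine ⟨by simpa [List.isEmpty_iff] using h, ?_⟩
          intro c hc; exact hcur c (List.mem_reverse.mp hc)
  | cons c rest ih =>
      intro cur acc hcur hacc t ht
      by_cases hsp : PySem.Chars.isspace c = true
      · by_cases h : cur.isEmpty
        · simp [PySem.Chars.split₀.go, hsp, h] at ht
          exact ih [] acc (by simp) hacc t ht
        · simp [PySem.Chars.split₀.go, hsp, h] at ht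
          refine ih [] (cur.reverse :: acc) (by simp) ?_ t ht
          intro u hu
          rcases List.mem_cons.mp hu with h1 | h2
          · subst h1
            refine ⟨by simpa [List.isEmpty_iff] using h, ?_⟩
            intro d hd; exact hcur d (List.mem_reverse.mp hd)
          · exact hacc u h2
      · have hsp' : PySem.Chars.isspace c = false := by simpa using hsp
        simp [PySem.Chars.split₀.go, hsp'] at ht
        refine ih (c :: cur) acc ?_ hacc t ht
        intro d hd
        rcases List.mem_cons.mp hd with h1 | h2
        · subst h1; exact hsp'
        · exact hcur d h2

-- joining good tokens with ' ' and re-splitting recovers them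
theorem pv_join_split (ts : List (List Char)) (hts : ∀ t ∈ ts, pvGood t) :
    ∀ acc, PySem.Chars.split₀.go (PySem.Chars.join [' '] ts) [] acc = acc.reverse ++ ts := by
  induction ts with
  | nil => intro acc; simp [PySem.Chars.join_nil, PySem.Chars.split₀.go]
  | cons t ts ih =>
      intro acc
      have hg : pvGood t := hts t (by simp)
      have hne : ¬ t.reverse.isEmpty := by simp [List.isEmpty_iff, hg.1]
      cases ts with
      | nil =>
          rw [PySem.Chars.join_singleton]
          have := pv_go_word t hg.2 [] [] acc
          simp at this
          rw [this]
          simp [PySem.Chars.split₀.go, hne]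
      | cons t' ts' =>
          rw [PySem.Chars.join_cons_cons]
          rw [List.append_assoc, pv_go_word t hg.2 _ [] acc]
          have hsp : PySem.Chars.isspace ' ' = true := by decide
          simp only [List.append_nil, List.singleton_append]
          rw [show PySem.Chars.split₀.go (' ' :: PySem.Chars.join [' '] (t' :: ts')) t.reverse acc
              = PySem.Chars.split₀.go (PySem.Chars.join [' '] (t' :: ts')) [] (t.reverse.reverse :: acc) by
            simp [PySem.Chars.split₀.go, hsp, hne]]
          rw [ih (fun u hu => hts u (by simp [hu])) (t.reverse.reverse :: acc)]
          simp

theorem pv_normalize (s : String) :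
    PySem.Str.split₀ (PySem.Str.join " " (PySem.Str.split₀ s)) = PySem.Str.split₀ s := by
  apply List.map_injective_iff.mpr (fun _ _ h => String.toList_injective h)
  rw [PySem.Str.split₀_map_toList, PySem.Str.split₀_map_toList]
  have h1 : (PySem.Str.join " " (PySem.Str.split₀ s)).toList
      = PySem.Chars.join [' '] (PySem.Chars.split₀ s.toList) := by
    rw [PySem.Str.toList_join, PySem.Str.split₀_map_toList]; rfl
  rw [h1]
  have hg : ∀ t ∈ PySem.Chars.split₀ s.toList, pvGood t := by
    intro t ht
    exact pv_tokens_good s.toList [] [] (by simp) (by simp) t ht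
  have := pv_join_split (PySem.Chars.split₀ s.toList) hg []
  simpa [PySem.Chars.split₀] using this

-- A's loop step
def pvStepA (st : List String × Bool) (t : String) : List String × Bool :=
  if pvHasTime t || st.2 then (st.1 ++ [t], true) else st

theorem pv_loopA_true : ∀ (R : List String) (acc : List String),
    R.foldl pvStepA (acc, true) = (acc ++ R, true) := by
  intro R
  induction R with
  | nil => intro acc; simp
  | cons t R ih => intro acc; simp [pvStepA, ih]

theorem pv_loopA_false : ∀ (R acc : List String),
    (R.foldl pvStepA (acc, false)).1 = acc ++ R.dropWhile (fun t => !pvHasTime t) := by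
  intro R
  induction R with
  | nil => intro acc; simp
  | cons t R ih =>
      intro acc
      by_cases hp : pvHasTime t
      · simp [pvStepA, hp, pv_loopA_true]
      · simp [pvStepA, hp, ih]

-- fold over range-indexed getD equals fold over the list
theorem pv_foldl_getD_range {α β : Type} (d : α) (f : β → α → β) :
    ∀ (R : List α) (init : β),
    (List.range R.length).foldl (fun st k => f st (R.getD k d)) init = R.foldl f init := by
  intro R
  induction R with
  | nil => intro init; simp
  | cons r R ih =>
      intro init
      rw [List.length_cons, List.range_succ_eq_map]
      simp only [List.foldl_cons, List.foldl_map, List.getD_cons_zero]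
      have : (fun (st : β) (k : Nat) => f st ((r :: R).getD k.succ d))
           = fun st k => f st (R.getD k d) := by
        funext st k; simp
      rw [this, ih]

-- A's backward indexed loop is a fold over the reversed token list
theorem pv_A_fold (L : List String) :
    (PySem.List.pyRange ((L.length : Int) - 1) (-1) (-1)).foldl
      (fun (st : List String × Bool) i => pvStepA st (PySem.List.pyGetD L i ""))
      ([], false)
    = L.reverse.foldl pvStepA ([], false) := by
  rw [PySem.List.pyRange_neg_one]
  have hn : ((L.length : Int) - 1 - (-1)).toNat = L.length := by omega
  rw [hn, List.foldl_map, ← pv_foldl_getD_range "" pvStepA L.reverse]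
  have hlen : L.reverse.length = L.length := by simp
  rw [hlen]
  apply PySem.List.foldl_congr_mem
  intro acc k hk
  have hk' : k < L.length := List.mem_range.mp hk
  have hcast : ((L.length : Int) - 1 - (k : Int)) = ((L.length - 1 - k : Nat) : Int) := by omega
  rw [hcast, PySem.List.pyGetD_natCast]
  congr 1
  have h1 : L.length - 1 - k < L.length := by omega
  have h2 : k < L.reverse.length := by simpa using hk'
  rw [List.getD_eq_getElem L "" h1, List.getD_eq_getElem L.reverse "" h2,
      List.getElem_reverse]

-- enumerate of a snoc
theorem pv_enumerate_snoc {α : Type} (M : List α) (x : α) :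
    ∀ (s : Int), PySem.List.enumerate (M ++ [x]) s
      = PySem.List.enumerate M s ++ [(s + M.length, x)] := by
  induction M with
  | nil => intro s; simp [PySem.List.enumerate]
  | cons m M ih =>
      intro s
      simp only [List.cons_append, PySem.List.enumerate, ih (s + 1), List.length_cons]
      have h : s + 1 + (M.length : Int) = s + ((M.length + 1 : Nat) : Int) := by push_cast; ring
      rw [h]

-- enumerate indices are within [s, s + length)
theorem pv_mem_enumerate {α : Type} : ∀ (L : List α) (s : Int) (q : Int × α),
    q ∈ PySem.List.enumerate L s → s ≤ q.1 ∧ q.1 < s + L.length := by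
  intro L
  induction L with
  | nil => intro s q hq; simp [PySem.List.enumerate] at hq
  | cons x L ih =>
      intro s q hq
      simp only [PySem.List.enumerate, List.mem_cons] at hq
      rcases hq with h | h
      · subst h
        constructor
        · exact le_rfl
        · simp only [List.length_cons]; push_cast; omega
      · have := ih (s + 1) q h
        constructor <;> [omega; (simp only [List.length_cons]; push_cast; omega)]

def pvMatches (L : List String) : List Int :=
  ((PySem.List.enumerate L).filter (fun q => pvHasTime q.2)).map (fun q => q.1)

def pvLast (L : List String) : Int :=
  (PySem.List.max? (pvMatches L) (fun x => x)).getD (-1)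

theorem pv_matches_bounds (L : List String) :
    ∀ i ∈ pvMatches L, 0 ≤ i ∧ i < L.length := by
  intro i hi
  simp only [pvMatches, List.mem_map, List.mem_filter] at hi
  obtain ⟨q, ⟨hq, _⟩, rfl⟩ := hi
  have := pv_mem_enumerate L 0 q hq
  omega

theorem pv_max_snoc (ms : List Int) (m : Int) (h : ∀ y ∈ ms, y < m) :
    PySem.List.max? (ms ++ [m]) (fun x => x) = some m := by
  cases hv : PySem.List.max? (ms ++ [m]) (fun x => x) with
  | none =>
      exact absurd ((PySem.List.max?_eq_none_iff _ _).mp hv) (by simp)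
  | some v =>
      have hmem := PySem.List.max?_mem hv
      have hmax := PySem.List.max?_isMax hv m (by simp)
      rcases List.mem_append.mp hmem with hl | hr
      · exact absurd (h v hl) (by omega)
      · simpa using hr

theorem pv_matches_snoc (M : List String) (x : String) :
    pvMatches (M ++ [x]) = pvMatches M ++ (if pvHasTime x then [(M.length : Int)] else []) := by
  simp only [pvMatches, pv_enumerate_snoc M x 0, List.filter_append, List.map_append]
  congr 1
  by_cases hp : pvHasTime x <;> simp [hp]

-- core: B's take-prefix equals A's reversed dropWhile of the reverse
theorem pv_main (L : List String) :
    L.take (pvLast L + 1).toNat = (L.reverse.dropWhile (fun t => !pvHasTime t)).reverse := by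
  induction L using List.reverseRecOn with
  | nil => simp [pvLast, pvMatches, PySem.List.enumerate, PySem.List.max?]
  | append_singleton M x ih =>
      by_cases hp : pvHasTime x
      · have hmax : PySem.List.max? (pvMatches (M ++ [x])) (fun y => y) = some (M.length : Int) := by
          rw [pv_matches_snoc, if_pos hp]
          exact pv_max_snoc _ _ (fun y hy => by have := pv_matches_bounds M y hy; omega)
        have hlast : pvLast (M ++ [x]) = (M.length : Int) := by simp [pvLast, hmax]
        rw [hlast]
        have htake : ((M.length : Int) + 1).toNat = (M ++ [x]).length := by simp
        rw [htake, List.take_length]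
        simp [hp]
      · have hlast : pvLast (M ++ [x]) = pvLast M := by
          simp [pvLast, pv_matches_snoc, hp]
        have hle : (pvLast M + 1).toNat ≤ M.length := by
          cases hv : PySem.List.max? (pvMatches M) (fun y => y) with
          | none => simp [pvLast, hv]
          | some v =>
              have := pv_matches_bounds M v (PySem.List.max?_mem hv)
              simp only [pvLast, hv, Option.getD_some]
              omega
        rw [hlast, List.take_append_of_le_length hle, ih]
        simp [hp]

theorem pv_B_eval (s : String) :
    remove_redundant_corpus_alt s
      = PySem.Str.join " " (PySem.List.slice (PySem.Str.split₀ s) none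
          (some (pvLast (PySem.Str.split₀ s) + 1))) := rfl

theorem pv_nonneg_last (L : List String) : 0 ≤ pvLast L + 1 := by
  cases hv : PySem.List.max? (pvMatches L) (fun y => y) with
  | none => simp [pvLast, hv]
  | some v =>
      have := pv_matches_bounds L v (PySem.List.max?_mem hv)
      simp only [pvLast, hv, Option.getD_some]
      omega

-- ===== VERDICT (by name: the statement is the Claim_ definition above) =====
theorem remove_redundant_corpus_spec : Claim_equal_remove_redundant_corpus := by
  unfold Claim_equal_remove_redundant_corpus
  intro s _
  unfold Spec_remove_redundant_corpus remove_redundant_corpus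
  simp only [pv_normalize]
  set L := PySem.Str.split₀ s with hL
  have hstep : (fun (st : List String × Bool) i =>
      if PySem.Str.isIn "AM" (PySem.List.pyGetD L i "") ||
         PySem.Str.isIn "PM" (PySem.List.pyGetD L i "") ||
         PySem.Str.isIn "am" (PySem.List.pyGetD L i "") ||
         PySem.Str.isIn "pm" (PySem.List.pyGetD L i "") || st.2 then
        (st.1 ++ [PySem.List.pyGetD L i ""], true)
      else st)
    = fun (st : List String × Bool) i => pvStepA st (PySem.List.pyGetD L i "") := by
    funext st i
    simp [pvStepA, pvHasTime, Bool.or_assoc]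
  rw [hstep, pv_A_fold]
  rw [show remove_redundant_corpus_alt s
      = PySem.Str.join " " (PySem.List.slice L none (some (pvLast L + 1))) from pv_B_eval s,
    PySem.List.slice_to L (pv_nonneg_last L)]
  have h1 : (L.reverse.foldl pvStepA ([], false)).1
      = L.reverse.dropWhile (fun t => !pvHasTime t) := by
    simpa using pv_loopA_false L.reverse []
  rw [h1, ← pv_main L]
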